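-- pv_equiv track=rewrite | github.com/Sollinselvan89/meal_recommendation_system | app/update_existing_data.py | extract_categories_from_tags
-- ===== SOURCE A (Python) =====
-- def extract_categories_from_tags(diet_tags):
--     """Extract relevant categories from diet tags"""
--     # Define mapping from diet tags to categories
--     category_mappings = {
--         "vegan": "vegan",
--         "vegetarian": "vegetarian",
--         "gluten free": "gluten free",
--         "dairy free": "dairy free",
--         "pescatarian": "pescatarian",
--         "ketogenic": "ketogenic",
--         "keto": "ketogenic",
--         "paleo": "paleo",
--         "whole30": "whole30"
--     }
--
--     # List of the eight main categories we're tracking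
--     main_categories = ["vegetarian", "vegan", "gluten free", "ketogenic",
--                       "paleo", "whole30", "pescatarian", "dairy free"]
--
--     # Extract categories from diet tags
--     categories = set()
--     if diet_tags:
--         diet_tags_list = diet_tags.split(',')
--         for tag in diet_tags_list:
--             tag = tag.strip().lower()
--             if tag in category_mappings:
--                 categories.add(category_mappings[tag])
--
--     # Sort categories to ensure consistent ordering, prioritizing main categories
--     sorted_categories = []
--     for category in main_categories:
--         if category in categories:
--             sorted_categories.append(category)
--
--     # Add any remaining categories not in the main list
--     for category in sorted(categories):
--         if category not in main_categories and category not in sorted_categories: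
--             sorted_categories.append(category)
--
--     return sorted_categories
-- ===== SOURCE B (Python) =====
-- def extract_categories_from_tags(diet_tags):
--     """Extract relevant categories from diet tags.
--
--     Inverted formulation: collect the normalized tags once into a set, then
--     walk the fixed priority list and keep each category for which one of its
--     trigger tags is present. No tag->category dict, no set of categories,
--     no ordering passes: the output order is the traversal order of keys_for."""
--     keys_for = {
--         "vegetarian": ("vegetarian",),
--         "vegan": ("vegan",),
--         "gluten free": ("gluten free",),
--         "ketogenic": ("ketogenic", "keto"),
--         "paleo": ("paleo",),
--         "whole30": ("whole30",),
--         "pescatarian": ("pescatarian",),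
--         "dairy free": ("dairy free",),
--     }
--     tags = {t.strip().lower() for t in diet_tags.split(',')} if diet_tags else set()
--     return [cat for cat, keys in keys_for.items() if any(k in tags for k in keys)]
-- ===== Notes on version B (the rewrite author's own statement) =====
-- stated objective: simpler
-- what changed: Instead of mapping each tag through a dict into a set of categories and then running two ordering loops, B collects the normalized tags into a set once and produces the answer as a single comprehension filtering the fixed priority list by whether any of that category's trigger tags is present; the tag->category dict, the category set and both ordering passes disappear.
import Mathlib
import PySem

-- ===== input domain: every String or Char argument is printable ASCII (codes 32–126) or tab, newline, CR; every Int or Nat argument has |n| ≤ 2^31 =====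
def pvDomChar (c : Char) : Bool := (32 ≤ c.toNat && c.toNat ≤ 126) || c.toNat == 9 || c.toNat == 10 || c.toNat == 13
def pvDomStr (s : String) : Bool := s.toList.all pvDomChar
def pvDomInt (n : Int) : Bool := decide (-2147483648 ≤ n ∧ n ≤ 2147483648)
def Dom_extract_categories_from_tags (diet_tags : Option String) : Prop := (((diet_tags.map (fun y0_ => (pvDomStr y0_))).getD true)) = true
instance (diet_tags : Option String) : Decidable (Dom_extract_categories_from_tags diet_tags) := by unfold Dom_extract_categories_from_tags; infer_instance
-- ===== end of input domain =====

-- B is a simpler decomposition (one pass filtering the priority list by a set of normalized tags); return values proved equal.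

-- ===== PORT A =====
-- literal port of A: dict lookup per tag into a set of categories, then two ordering loops
def pvMappingsA : PySem.Dict String String :=
  PySem.Dict.ofList [("vegan","vegan"),("vegetarian","vegetarian"),("gluten free","gluten free"),
    ("dairy free","dairy free"),("pescatarian","pescatarian"),("ketogenic","ketogenic"),
    ("keto","ketogenic"),("paleo","paleo"),("whole30","whole30")]

def pvMainA : List String :=
  ["vegetarian","vegan","gluten free","ketogenic","paleo","whole30","pescatarian","dairy free"]

-- the set-building loop of A ('if diet_tags:' is falsy for None and "")
def pvCatsA (diet_tags : Option String) : PySem.Set String :=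
  match diet_tags with
  | none => PySem.Set.empty
  | some s =>
    if s = "" then PySem.Set.empty
    else
      -- split? is `some` here since the separator "," is nonempty
      ((PySem.Str.split? s ",").getD []).foldl
        (fun cats tag =>
          let t := PySem.Str.lower (PySem.Str.strip tag)
          if pvMappingsA.contains t then
            -- the lookup is guarded by `contains`, so getD never takes its default
            PySem.Set.add cats ((pvMappingsA.get? t).getD "")
          else cats)
        PySem.Set.empty

def extract_categories_from_tags (diet_tags : Option String) : List String :=
  let categories := pvCatsA diet_tags
  let sorted_categories :=
    pvMainA.foldl (fun acc category =>
      if PySem.Set.contains categories category then acc ++ [category] else acc) []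
  (PySem.List.sorted categories (fun x => x) false).foldl
    (fun acc category =>
      if category ∉ pvMainA ∧ category ∉ acc then acc ++ [category] else acc)
    sorted_categories

-- ===== PORT B =====
-- port of B: a set of normalized tags, and one comprehension over the category -> trigger-keys table
def pvKeysForB : List (String × List String) :=
  [("vegetarian", ["vegetarian"]), ("vegan", ["vegan"]), ("gluten free", ["gluten free"]),
   ("ketogenic", ["ketogenic","keto"]), ("paleo", ["paleo"]), ("whole30", ["whole30"]),
   ("pescatarian", ["pescatarian"]), ("dairy free", ["dairy free"])]

def pvTagsB (diet_tags : Option String) : PySem.Set String :=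
  match diet_tags with
  | none => PySem.Set.empty
  | some s =>
    if s = "" then PySem.Set.empty
    else PySem.Set.ofList (((PySem.Str.split? s ",").getD []).map
      (fun t => PySem.Str.lower (PySem.Str.strip t)))

def extract_categories_from_tags_alt (diet_tags : Option String) : List String :=
  let tags := pvTagsB diet_tags
  (pvKeysForB.filter (fun p => p.2.any (fun k => PySem.Set.contains tags k))).map Prod.fst

-- ===== PRECONDITION & SPEC =====
def Spec_extract_categories_from_tags (diet_tags : Option String) (out : List String) : Prop := out = extract_categories_from_tags_alt diet_tags
instance (diet_tags : Option String) (out : List String) : Decidable (Spec_extract_categories_from_tags diet_tags out) := by unfold Spec_extract_categories_from_tags; infer_instance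

-- ===== CLAIM (what is proved, stated in full; the proofs are below) =====
def Claim_equal_extract_categories_from_tags : Prop := ∀ (diet_tags : Option String), Dom_extract_categories_from_tags diet_tags → Spec_extract_categories_from_tags diet_tags (extract_categories_from_tags diet_tags)

-- ===== LEMMAS AND PROOFS =====

-- the normalized tag list both programs process
def pvSplitL (diet_tags : Option String) : List String :=
  match diet_tags with
  | none => []
  | some s => if s = "" then [] else (PySem.Str.split? s ",").getD []

lemma pvGetA_char (t c : String) :
    pvMappingsA.get? t = some c ↔
      ((t = "vegan" ∧ c = "vegan") ∨ (t = "vegetarian" ∧ c = "vegetarian") ∨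
       (t = "gluten free" ∧ c = "gluten free") ∨ (t = "dairy free" ∧ c = "dairy free") ∨
       (t = "pescatarian" ∧ c = "pescatarian") ∨ (t = "ketogenic" ∧ c = "ketogenic") ∨
       (t = "keto" ∧ c = "ketogenic") ∨ (t = "paleo" ∧ c = "paleo") ∨
       (t = "whole30" ∧ c = "whole30")) := by
  have hm : pvMappingsA = PySem.Dict.mk [("vegan","vegan"),("vegetarian","vegetarian"),
      ("gluten free","gluten free"),("dairy free","dairy free"),("pescatarian","pescatarian"),
      ("ketogenic","ketogenic"),("keto","ketogenic"),("paleo","paleo"),("whole30","whole30")] := by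
    decide
  rw [hm]
  simp only [PySem.Dict.get?_mk_cons, beq_iff_eq]
  split_ifs with h1 h2 h3 h4 h5 h6 h7 h8 h9 <;>
    simp_all [PySem.Dict.get?, eq_comm]

lemma pvMem_cats_foldl (l : List String) (s : List String) (x : String) :
    x ∈ l.foldl
        (fun cats tag =>
          let t := PySem.Str.lower (PySem.Str.strip tag)
          if pvMappingsA.contains t then
            PySem.Set.add cats ((pvMappingsA.get? t).getD "")
          else cats) s
      ↔ x ∈ s ∨ ∃ tag ∈ l, pvMappingsA.get? (PySem.Str.lower (PySem.Str.strip tag)) = some x := by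
  induction l generalizing s with
  | nil => simp
  | cons tag rest ih =>
    simp only [List.foldl_cons]
    by_cases hc : pvMappingsA.contains (PySem.Str.lower (PySem.Str.strip tag)) = true
    · have hs : (pvMappingsA.get? (PySem.Str.lower (PySem.Str.strip tag))).isSome := by
        rw [← PySem.Dict.contains_eq_isSome_get?]; exact hc
      obtain ⟨v, hv⟩ := Option.isSome_iff_exists.mp hs
      simp only [hc, if_pos, ih, PySem.Set.mem_add, hv, Option.getD_some]
      constructor
      · rintro ((h | rfl) | ⟨tg, htg, hget⟩)
        · exact Or.inl h
        · exact Or.inr ⟨tag, List.mem_cons_self, hv⟩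
        · exact Or.inr ⟨tg, List.mem_cons_of_mem _ htg, hget⟩
      · rintro (h | ⟨tg, htg, hget⟩)
        · exact Or.inl (Or.inl h)
        · rcases List.mem_cons.mp htg with rfl | htg
          · exact Or.inl (Or.inr (by rw [hv] at hget; exact (Option.some_inj.mp hget).symm))
          · exact Or.inr ⟨tg, htg, hget⟩
    · simp only [hc, if_neg, Bool.false_eq_true, not_false_iff, ih]
      constructor
      · rintro (h | ⟨tg, htg, hget⟩)
        · exact Or.inl h
        · exact Or.inr ⟨tg, List.mem_cons_of_mem _ htg, hget⟩
      · rintro (h | ⟨tg, htg, hget⟩)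
        · exact Or.inl h
        · rcases List.mem_cons.mp htg with rfl | htg
          · exact absurd (by rw [PySem.Dict.contains_eq_isSome_get?, hget]; rfl) hc
          · exact Or.inr ⟨tg, htg, hget⟩

lemma pvMem_catsA (diet_tags : Option String) (x : String) :
    x ∈ pvCatsA diet_tags ↔
      ∃ tag ∈ pvSplitL diet_tags,
        pvMappingsA.get? (PySem.Str.lower (PySem.Str.strip tag)) = some x := by
  cases diet_tags with
  | none => simp [pvCatsA, pvSplitL, PySem.Set.empty]
  | some s =>
    by_cases hs : s = "" <;>
      simp [pvCatsA, pvSplitL, hs, PySem.Set.empty, pvMem_cats_foldl]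

lemma pvMem_tagsB (diet_tags : Option String) (k : String) :
    k ∈ pvTagsB diet_tags ↔
      ∃ tag ∈ pvSplitL diet_tags, PySem.Str.lower (PySem.Str.strip tag) = k := by
  cases diet_tags with
  | none => simp [pvTagsB, pvSplitL, PySem.Set.empty]
  | some s =>
    by_cases hs : s = "" <;>
      simp [pvTagsB, pvSplitL, hs, PySem.Set.empty, PySem.Set.mem_ofList, eq_comm]

-- the per-category bridge: A's category set contains c iff one of c's trigger tags was seen
lemma pvContains_eq (diet_tags : Option String) (c : String) (ks : List String)
    (h : (c, ks) ∈ pvKeysForB) :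
    PySem.Set.contains (pvCatsA diet_tags) c
      = ks.any (fun k => PySem.Set.contains (pvTagsB diet_tags) k) := by
  rw [Bool.eq_iff_iff, PySem.Set.contains_iff, List.any_eq_true]
  simp only [PySem.Set.contains_iff, pvMem_catsA, pvMem_tagsB]
  constructor
  · rintro ⟨tag, htag, hget⟩
    rw [pvGetA_char] at hget
    fin_cases h <;>
      · rcases hget with ⟨h1, h2⟩|⟨h1, h2⟩|⟨h1, h2⟩|⟨h1, h2⟩|⟨h1, h2⟩|⟨h1, h2⟩|⟨h1, h2⟩|⟨h1, h2⟩|⟨h1, h2⟩ <;>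
          first
            | exact absurd h2 (by decide)
            | exact ⟨_, by rw [h1]; decide, tag, htag, rfl⟩
  · rintro ⟨k, hk, tag, htag, hnorm⟩
    refine ⟨tag, htag, ?_⟩
    rw [pvGetA_char, hnorm]
    fin_cases h <;> simp_all

lemma pvValues_in_main (t x : String)
    (h : pvMappingsA.get? t = some x) : x ∈ pvMainA := by
  rw [pvGetA_char] at h
  rcases h with ⟨_, rfl⟩|⟨_, rfl⟩|⟨_, rfl⟩|⟨_, rfl⟩|⟨_, rfl⟩|⟨_, rfl⟩|⟨_, rfl⟩|⟨_, rfl⟩|⟨_, rfl⟩ <;> decide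

lemma pvSkip (l acc : List String) (h : ∀ x ∈ l, x ∈ pvMainA) :
    l.foldl (fun acc category =>
      if category ∉ pvMainA ∧ category ∉ acc then acc ++ [category] else acc) acc = acc := by
  induction l generalizing acc with
  | nil => rfl
  | cons c rest ih =>
    simp only [List.foldl_cons]
    rw [if_neg (by simp [h c (List.mem_cons_self)])]
    exact ih _ (fun x hx => h x (List.mem_cons_of_mem _ hx))

lemma pvFilterMapFst {α β : Type} (l : List (α × β)) (f : α × β → Bool) (g : α → Bool)
    (h : ∀ p ∈ l, f p = g p.1) :
    (l.filter f).map Prod.fst = (l.map Prod.fst).filter g := by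
  induction l with
  | nil => rfl
  | cons p rest ih =>
    simp only [List.filter_cons, List.map_cons, h p List.mem_cons_self]
    cases hg : g p.1 <;>
      simp [ih (fun q hq => h q (List.mem_cons_of_mem _ hq))]

-- ===== VERDICT (by name: the statement is the Claim_ definition above) =====
theorem extract_categories_from_tags_spec : Claim_equal_extract_categories_from_tags := by
  intro diet_tags _
  unfold Spec_extract_categories_from_tags
  unfold extract_categories_from_tags extract_categories_from_tags_alt
  simp only [PySem.List.foldl_append_if_eq_filter, List.nil_append]
  rw [pvSkip _ _ (fun x hx => by
    obtain ⟨tag, _, hget⟩ := (pvMem_catsA diet_tags x).mp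
      ((PySem.List.mem_sorted _ _ _ _).mp hx)
    exact pvValues_in_main _ _ hget)]
  rw [pvFilterMapFst pvKeysForB _ (fun c => PySem.Set.contains (pvCatsA diet_tags) c)
    (fun p hp => (pvContains_eq diet_tags p.1 p.2 hp).symm)]
  rfl
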